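-- pv_equiv track=rewrite | github.com/mohamed-elkholy95/Pythinker | sandbox/enhanced_execution_implementation.py | extract_task_constraints
-- ===== SOURCE A (Python) =====
-- def extract_task_constraints(step_description: str) -> list[str]:
--     """Extract constraints from a task description.
--
--     Args:
--         step_description: The step description
--
--     Returns:
--         List of extracted constraints
--     """
--     constraints = []
--
--     # Look for common constraint patterns
--     constraint_patterns = [
--         ("must", "Requirement"),
--         ("should", "Recommendation"),
--         ("without", "Exclusion"),
--         ("only", "Limitation"),
--         ("within", "Boundary"),
--         ("before", "Deadline"),
--         ("after", "Dependency"),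
--         ("not", "Prohibition"),
--     ]
--
--     step_lower = step_description.lower()
--     for pattern, label in constraint_patterns:
--         if pattern in step_lower:
--             # Find the sentence containing the pattern
--             sentences = step_description.split('.')
--             for sentence in sentences:
--                 if pattern in sentence.lower():
--                     constraints.append(f"{label}: {sentence.strip()}")
--                     break
--
--     return constraints[:5]  # Limit to 5 constraints
-- ===== SOURCE B (Python) =====
-- def extract_task_constraints(step_description: str) -> list[str]:
--     """Extract constraints from a task description (single indexing pass over sentences)."""
--     constraint_patterns = [
--         ("must", "Requirement"),
--         ("should", "Recommendation"),
--         ("without", "Exclusion"),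
--         ("only", "Limitation"),
--         ("within", "Boundary"),
--         ("before", "Deadline"),
--         ("after", "Dependency"),
--         ("not", "Prohibition"),
--     ]
--
--     sentences = step_description.split('.')
--     first = {}
--     for sentence in sentences:
--         low = sentence.lower()
--         for pattern, _label in constraint_patterns:
--             if pattern not in first and pattern in low:
--                 first[pattern] = sentence
--
--     result = []
--     for pattern, label in constraint_patterns:
--         if pattern in first:
--             result.append(f"{label}: {first[pattern].strip()}")
--     return result[:5]
-- ===== Notes on version B (the rewrite author's own statement) =====
-- stated objective: alternative
-- what changed: A re-splits the description and rescans the sentence list once per matched pattern; B splits once and makes a single indexing pass over the sentences, recording in a dict the earliest matching sentence per pattern, then emits the constraints in pattern order.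
import Mathlib
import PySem

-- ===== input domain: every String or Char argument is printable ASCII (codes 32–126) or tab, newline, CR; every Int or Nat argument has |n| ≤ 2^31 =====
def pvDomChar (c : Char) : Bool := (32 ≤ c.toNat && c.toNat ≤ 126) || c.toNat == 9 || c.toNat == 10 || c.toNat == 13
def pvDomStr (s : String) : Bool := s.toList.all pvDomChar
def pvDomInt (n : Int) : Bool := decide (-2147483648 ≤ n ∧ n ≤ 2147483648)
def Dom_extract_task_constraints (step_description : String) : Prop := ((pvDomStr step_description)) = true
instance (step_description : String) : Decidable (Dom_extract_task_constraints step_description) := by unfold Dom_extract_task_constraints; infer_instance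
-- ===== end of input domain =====

-- B splits the description into sentences once and makes a single pass over them,
-- recording the earliest matching sentence per pattern in a dict, instead of A's
-- re-split + rescan of the sentence list for every matched pattern.

-- ===== PORT A =====

-- the fixed (pattern, label) table of the Python source
def pvPatterns : List (String × String) :=
  [("must", "Requirement"), ("should", "Recommendation"), ("without", "Exclusion"),
   ("only", "Limitation"), ("within", "Boundary"), ("before", "Deadline"),
   ("after", "Dependency"), ("not", "Prohibition")]

-- A's inner 'for sentence in sentences: … break' loop
def pvFirstMatch (pattern label : String) (sentences : List String) (acc : List String) : List String :=
  match sentences with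
  | [] => acc
  | t :: rest =>
    if PySem.Str.isIn pattern (PySem.Str.lower t) then acc ++ [label ++ ": " ++ PySem.Str.strip t]
    else pvFirstMatch pattern label rest acc

def extract_task_constraints (step_description : String) : List String :=
  let step_lower := PySem.Str.lower step_description
  let constraints := pvPatterns.foldl (fun acc pl =>
    if PySem.Str.isIn pl.1 step_lower then
      pvFirstMatch pl.1 pl.2
        ((PySem.Chars.splitOn step_description.toList ['.']).map String.ofList) acc
    else acc) []
  PySem.List.slice constraints none (some 5)

-- ===== PORT B =====

-- B's single indexing pass: dict from pattern to the earliest sentence containing it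
def pvIndexSentences (sentences : List String) : PySem.Dict String String :=
  sentences.foldl (fun d t =>
    pvPatterns.foldl (fun d' pl =>
      if !d'.contains pl.1 && PySem.Str.isIn pl.1 (PySem.Str.lower t) then d'.insert pl.1 t
      else d') d)
    PySem.Dict.empty

def extract_task_constraints_alt (step_description : String) : List String :=
  let sentences := (PySem.Chars.splitOn step_description.toList ['.']).map String.ofList
  let first := pvIndexSentences sentences
  let result := pvPatterns.foldl (fun acc pl =>
    match first.get? pl.1 with
    | some t => acc ++ [pl.2 ++ ": " ++ PySem.Str.strip t]
    | none => acc) []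
  PySem.List.slice result none (some 5)

-- ===== PRECONDITION & SPEC =====
def Spec_extract_task_constraints (step_description : String) (out : List String) : Prop := out = extract_task_constraints_alt step_description
instance (step_description : String) (out : List String) : Decidable (Spec_extract_task_constraints step_description out) := by unfold Spec_extract_task_constraints; infer_instance

-- ===== CLAIM (what is proved, stated in full; the proofs are below) =====
def Claim_equal_extract_task_constraints : Prop := ∀ (step_description : String), Dom_extract_task_constraints step_description → Spec_extract_task_constraints step_description (extract_task_constraints step_description)

-- ===== LEMMAS AND PROOFS =====

-- every piece produced by splitOn is an infix of the input
theorem pv_splitOn_go_infix (sep : List Char) (fuel : Nat) :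
    ∀ (l cur : List Char) (acc : List (List Char)) (cs0 : List Char),
      (∀ t ∈ acc, t <:+: cs0) → (cur.reverse ++ l) <:+: cs0 →
      ∀ t ∈ PySem.Chars.splitOn.go sep fuel l cur acc, t <:+: cs0 := by
  induction fuel with
  | zero =>
    intro l cur acc cs0 hacc hcl t ht
    simp [PySem.Chars.splitOn.go] at ht
    rcases ht with ht | ht
    · exact hacc t ht
    · exact ht ▸ hcl
  | succ fuel ih =>
    intro l cur acc cs0 hacc hcl t ht
    cases l with
    | nil =>
      simp [PySem.Chars.splitOn.go] at ht
      rcases ht with ht | ht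
      · exact hacc t ht
      · subst ht; exact List.IsInfix.trans ⟨[], [], by simp⟩ hcl
    | cons c rest =>
      rw [PySem.Chars.splitOn.go] at ht
      split at ht
      · refine ih _ [] _ cs0 ?_ ?_ t ht
        · intro u hu
          rcases List.mem_cons.mp hu with hu | hu
          · subst hu
            exact List.IsInfix.trans ⟨[], c :: rest, by simp⟩ hcl
          · exact hacc u hu
        · have h1 : List.drop sep.length (c :: rest) <:+: (c :: rest) :=
            (List.drop_suffix _ _).isInfix
          have h2 : (c :: rest) <:+: cur.reverse ++ (c :: rest) := ⟨cur.reverse, [], by simp⟩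
          simpa using (h1.trans h2).trans hcl
      · exact ih rest (c :: cur) acc cs0 hacc (by simpa using hcl) t ht

theorem pv_mem_splitOn_infix {cs sep t : List Char}
    (ht : t ∈ PySem.Chars.splitOn cs sep) : t <:+: cs := by
  exact pv_splitOn_go_infix sep (cs.length + 1) cs [] [] cs (by simp) (by simp) t ht

-- a pattern found in a sentence of the split is found in the whole lowered string
theorem pv_isIn_of_mem_split {sd : String} {u : List Char} {p : String}
    (hu : u ∈ PySem.Chars.splitOn sd.toList ['.'])
    (h : PySem.Str.isIn p (PySem.Str.lower (String.ofList u)) = true) :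
    PySem.Str.isIn p (PySem.Str.lower sd) = true := by
  rw [PySem.Str.isIn_iff_infix] at h ⊢
  simp only [PySem.Str.toList_lower] at h ⊢
  simp only [PySem.Chars.lower] at h ⊢
  have : (String.ofList u).toList = u := by simp
  rw [this] at h
  exact h.trans (List.IsInfix.map _ (pv_mem_splitOn_infix hu))

-- A's inner loop computed via find?
theorem pv_firstMatch_eq_find? (p l : String) (sentences : List String) (acc : List String) :
    pvFirstMatch p l sentences acc =
      match sentences.find? (fun t => PySem.Str.isIn p (PySem.Str.lower t)) with
      | some t => acc ++ [l ++ ": " ++ PySem.Str.strip t]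
      | none => acc := by
  induction sentences with
  | nil => rfl
  | cons t rest ih =>
    rw [pvFirstMatch]
    by_cases h : PySem.Str.isIn p (PySem.Str.lower t) = true
    · rw [if_pos h, show List.find? (fun t => PySem.Str.isIn p (PySem.Str.lower t)) (t :: rest)
          = some t from List.find?_cons_of_pos h]
    · rw [if_neg h, show List.find? (fun t => PySem.Str.isIn p (PySem.Str.lower t)) (t :: rest)
          = List.find? (fun t => PySem.Str.isIn p (PySem.Str.lower t)) rest
          from List.find?_cons_of_neg h, ih]

-- the inner (per-sentence) dict pass, for an arbitrary pattern list
theorem pv_inner_get? (t : String) (p : String) :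
    ∀ (ps : List (String × String)) (d : PySem.Dict String String),
      (ps.foldl (fun d' pl =>
        if !d'.contains pl.1 && PySem.Str.isIn pl.1 (PySem.Str.lower t) then d'.insert pl.1 t
        else d') d).get? p =
      if p ∈ ps.map Prod.fst ∧ d.contains p = false ∧ PySem.Str.isIn p (PySem.Str.lower t) = true
        then some t else d.get? p := by
  intro ps
  induction ps with
  | nil => intro d; rw [List.foldl_nil, if_neg (by simp)]
  | cons pl rest ih =>
    intro d
    rw [List.foldl_cons]
    have hmemtail : ∀ q : String, q ≠ pl.1 →
        (q ∈ (pl :: rest).map Prod.fst ↔ q ∈ rest.map Prod.fst) := by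
      intro q hq; simp [hq]
    by_cases hp : pl.1 = p
    · subst hp
      by_cases hc : d.contains pl.1 = true
      · rw [if_neg (by simp [hc]), ih, if_neg (by simp [hc]), if_neg (by simp [hc])]
      · have hc' : d.contains pl.1 = false := by simpa using hc
        by_cases hm : PySem.Str.isIn pl.1 (PySem.Str.lower t) = true
        · have hmC : PySem.Chars.isIn pl.1.toList (PySem.Chars.lower t.toList) = true := by
            simpa using hm
          rw [if_pos (by simp [hc', hmC]), ih,
            if_neg (by simp [PySem.Dict.contains_insert_self]),
            PySem.Dict.get?_insert_self, if_pos ⟨by simp, hc', hm⟩]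
        · have hmC : PySem.Chars.isIn pl.1.toList (PySem.Chars.lower t.toList) = false := by
            simpa using hm
          rw [if_neg (by simp [hmC]), ih, if_neg (by simp [hmC]), if_neg (by simp [hmC])]
    · have hp' : p ≠ pl.1 := Ne.symm hp
      by_cases hg : (!d.contains pl.1 && PySem.Str.isIn pl.1 (PySem.Str.lower t)) = true
      · rw [if_pos hg, ih, PySem.Dict.get?_insert_of_ne d t hp',
          PySem.Dict.contains_insert d pl.1 p t]
        have hbe : (p == pl.1) = false := by simp [hp']
        rw [hbe, Bool.false_or]
        by_cases hcond : p ∈ rest.map Prod.fst ∧ d.contains p = false ∧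
            PySem.Str.isIn p (PySem.Str.lower t) = true
        · rw [if_pos hcond, if_pos ⟨(hmemtail p hp').mpr hcond.1, hcond.2.1, hcond.2.2⟩]
        · rw [if_neg hcond, if_neg (by
            rintro ⟨h1, h2, h3⟩
            exact hcond ⟨(hmemtail p hp').mp h1, h2, h3⟩)]
      · rw [if_neg hg, ih]
        by_cases hcond : p ∈ rest.map Prod.fst ∧ d.contains p = false ∧
            PySem.Str.isIn p (PySem.Str.lower t) = true
        · rw [if_pos hcond, if_pos ⟨(hmemtail p hp').mpr hcond.1, hcond.2.1, hcond.2.2⟩]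
        · rw [if_neg hcond, if_neg (by
            rintro ⟨h1, h2, h3⟩
            exact hcond ⟨(hmemtail p hp').mp h1, h2, h3⟩)]

-- the outer dict pass: lookup is the earliest matching sentence
theorem pv_index_get? (p : String) (hp : p ∈ pvPatterns.map Prod.fst) :
    ∀ (sentences : List String) (d : PySem.Dict String String),
      (sentences.foldl (fun d t =>
        pvPatterns.foldl (fun d' pl =>
          if !d'.contains pl.1 && PySem.Str.isIn pl.1 (PySem.Str.lower t) then d'.insert pl.1 t
          else d') d) d).get? p =
      if d.contains p = true then d.get? p
      else sentences.find? (fun t => PySem.Str.isIn p (PySem.Str.lower t)) := by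
  intro sentences
  induction sentences with
  | nil =>
    intro d
    rw [List.foldl_nil, List.find?_nil]
    by_cases hc : d.contains p = true
    · rw [if_pos hc]
    · rw [if_neg hc, (PySem.Dict.get?_eq_none_iff_contains d p).mpr (by simpa using hc)]
  | cons t rest ih =>
    intro d
    rw [List.foldl_cons, ih]
    set d1 := pvPatterns.foldl (fun d' pl =>
      if !d'.contains pl.1 && PySem.Str.isIn pl.1 (PySem.Str.lower t) then d'.insert pl.1 t
      else d') d with hd1
    have hget1 : d1.get? p =
        if p ∈ pvPatterns.map Prod.fst ∧ d.contains p = false ∧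
            PySem.Str.isIn p (PySem.Str.lower t) = true
          then some t else d.get? p := pv_inner_get? t p pvPatterns d
    by_cases hc : d.contains p = true
    · have h1 : d1.get? p = d.get? p := by rw [hget1, if_neg (by simp [hc])]
      have hc1 : d1.contains p = true := by
        rw [PySem.Dict.contains_eq_isSome_get?, h1, ← PySem.Dict.contains_eq_isSome_get?, hc]
      rw [if_pos hc1, if_pos hc, h1]
    · have hc' : d.contains p = false := by simpa using hc
      by_cases hm : PySem.Str.isIn p (PySem.Str.lower t) = true
      · have h1 : d1.get? p = some t := by rw [hget1, if_pos ⟨hp, hc', hm⟩]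
        have hc1 : d1.contains p = true := by
          rw [PySem.Dict.contains_eq_isSome_get?, h1]; rfl
        rw [if_pos hc1, h1, if_neg hc, show List.find?
          (fun t => PySem.Str.isIn p (PySem.Str.lower t)) (t :: rest)
          = some t from List.find?_cons_of_pos hm]
      · have hmC : PySem.Chars.isIn p.toList (PySem.Chars.lower t.toList) = false := by
          simpa using hm
        have h1 : d1.get? p = d.get? p := by rw [hget1, if_neg (by simp [hmC])]
        have hc1 : d1.contains p = false := by
          rw [PySem.Dict.contains_eq_isSome_get?, h1, ← PySem.Dict.contains_eq_isSome_get?, hc']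
        rw [if_neg (by simp [hc1]), if_neg hc,
          show List.find? (fun t => PySem.Str.isIn p (PySem.Str.lower t)) (t :: rest)
          = List.find? (fun t => PySem.Str.isIn p (PySem.Str.lower t)) rest
          from List.find?_cons_of_neg hm]

-- ===== VERDICT (by name: the statement is the Claim_ definition above) =====
theorem extract_task_constraints_spec : Claim_equal_extract_task_constraints := by
  intro sd _
  simp only [Spec_extract_task_constraints, extract_task_constraints, extract_task_constraints_alt]
  congr 1
  apply PySem.List.foldl_congr_mem
  intro acc pl hpl
  rw [pv_firstMatch_eq_find?, pvIndexSentences,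
    pv_index_get? pl.1 (List.mem_map.mpr ⟨pl, hpl, rfl⟩),
    if_neg (show ¬(PySem.Dict.empty.contains pl.1 = true) from by
      rw [PySem.Dict.contains_empty]; exact Bool.false_ne_true)]
  by_cases hg : PySem.Str.isIn pl.1 (PySem.Str.lower sd) = true
  · rw [if_pos hg]
  · rw [if_neg hg]
    have hg' : PySem.Str.isIn pl.1 (PySem.Str.lower sd) = false := by simpa using hg
    have hfind : ((PySem.Chars.splitOn sd.toList ['.']).map String.ofList).find?
        (fun t => PySem.Str.isIn pl.1 (PySem.Str.lower t)) = none := by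
      rw [List.find?_eq_none]
      intro t ht hcontra
      rcases List.mem_map.mp ht with ⟨u, hu, rfl⟩
      rw [pv_isIn_of_mem_split hu hcontra] at hg'
      exact absurd hg' (by decide)
    rw [hfind]
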